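-- pv_equiv track=rewrite | github.com/linhdvu14/cp-sols | sols/CodeForces/1864_d12_harbourspace/D_Matrix_Cascade.py | solve
-- ===== SOURCE A (Python) =====
-- def solve(N, grid):
--     # dp[d][s] = total flips over all (r, c) s.t. r - c <= d and r + c <= s
--     dp1 = [0] * (2 * N)
--     dp2 = [0] * (2 * N)
--
--     res = 0
--     for d in range(1 - N, N):
--         for s in range(2 * N - 1):
--             dp2[s] = dp2[s - 1] + dp1[s] - dp1[s - 1]
--             r, c = (s + d) // 2, (s - d) // 2
--             if (s + d) & 1 or not (0 <= c < N and 0 <= r < N): continue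
--             if (dp2[s] + int(grid[r][c])) & 1:
--                 dp2[s] += 1
--                 res += 1
--         dp1, dp2 = dp2, [0] * (2 * N)
--
--     return res
-- ===== SOURCE B (Python) =====
-- def solve(N, grid):
--     # Row-major greedy simulation: keep the list of triggered operations and
--     # count directly, for each cell, how many earlier operations cover it.
--     # An operation at (i, j) covers (r, c) iff i + j <= r + c and i - j <= r - c.
--     ops = []
--     for r in range(N):
--         for c in range(N):
--             par = sum(1 for (i, j) in ops if i + j <= r + c and i - j <= r - c)
--             if (par + int(grid[r][c])) % 2 == 1:
--                 ops.append((r, c))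
--     return len(ops)
-- ===== Notes on version B (the rewrite author's own statement) =====
-- stated objective: alternative
-- what changed: Replaced A's diagonal-by-diagonal rolling 2-D prefix-sum DP (dp arrays indexed by anti-diagonal, with negative-index wraparound reads) by a direct row-major greedy simulation that keeps the list of triggered operations and, for each cell, counts the earlier operations whose expanding triangle covers it.
import Mathlib
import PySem

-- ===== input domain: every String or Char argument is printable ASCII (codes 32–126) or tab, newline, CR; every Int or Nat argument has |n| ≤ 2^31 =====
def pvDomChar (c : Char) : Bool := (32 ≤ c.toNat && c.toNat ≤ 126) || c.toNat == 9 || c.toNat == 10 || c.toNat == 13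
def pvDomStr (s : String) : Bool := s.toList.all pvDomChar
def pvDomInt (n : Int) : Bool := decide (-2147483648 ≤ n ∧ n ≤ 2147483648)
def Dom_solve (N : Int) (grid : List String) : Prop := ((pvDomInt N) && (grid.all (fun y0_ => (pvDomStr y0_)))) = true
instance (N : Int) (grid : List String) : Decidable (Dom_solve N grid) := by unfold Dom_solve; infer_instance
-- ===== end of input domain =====

-- B replaces A's diagonal-by-diagonal rolling prefix-sum DP with a direct row-major greedy
-- simulation that keeps the list of triggered operations and counts covering operations per
-- cell (objective: alternative — clearer, no difference arrays; not faster).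

-- ===== PORT A =====
-- int(grid[r][c]) — shared by both Pythons verbatim; the .getD defaults are only taken where
-- Python would raise (IndexError/ValueError), which Pre_solve excludes.
def pyCell (grid : List String) (r c : Int) : Int :=
  (PySem.Int.ofStr? (String.ofList [(PySem.Str.pyGet? ((PySem.List.pyGet? grid r).getD "") c).getD ' '])).getD 0

-- one iteration of A's inner loop body (over s); state = (dp2, res).
-- dp2[s-1]/dp1[s-1] at s = 0 read index -1, Python's wrap to the last element: pyGetD is exact
-- there (the lists are nonempty whenever the loop runs).  dp2[s] after the assignment is the
-- just-computed v, so the second test reads v directly.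
def stepA (grid : List String) (N d : Int) (dp1 : List Int) (st : List Int × Int) (s : Int) :
    List Int × Int :=
  let v := PySem.List.pyGetD st.1 (s-1) 0 + PySem.List.pyGetD dp1 s 0 - PySem.List.pyGetD dp1 (s-1) 0
  let dp2 := PySem.List.pySetD st.1 s v
  let r := PySem.Int.floordiv (s+d) 2
  let c := PySem.Int.floordiv (s-d) 2
  if PySem.Int.band (s+d) 1 ≠ 0 ∨ ¬(0 ≤ c ∧ c < N ∧ 0 ≤ r ∧ r < N) then (dp2, st.2)
  else if PySem.Int.band (v + pyCell grid r c) 1 ≠ 0 then (PySem.List.pySetD dp2 s (v+1), st.2 + 1)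
  else (dp2, st.2)

-- one iteration of A's outer loop (over d): run the inner loop on a fresh dp2 = [0]*(2*N);
-- the result becomes the next (dp1, res).
def stepAOuter (grid : List String) (N : Int) (st : List Int × Int) (d : Int) : List Int × Int :=
  (PySem.List.pyRange 0 (2*N-1)).foldl (stepA grid N d st.1) (List.replicate (2*N).toNat 0, st.2)

def solve (N : Int) (grid : List String) : Int :=
  ((PySem.List.pyRange (1-N) N).foldl (stepAOuter grid N) (List.replicate (2*N).toNat 0, 0)).2

-- ===== PORT B =====
-- one iteration of B's inner loop (over c): count the triggered operations covering (r, c)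
-- and trigger a new one if the cell's effective parity is odd.
def stepB (grid : List String) (r : Int) (ops : List (Int × Int)) (c : Int) : List (Int × Int) :=
  let par := ops.foldl
    (fun acc p => if p.1 + p.2 ≤ r + c ∧ p.1 - p.2 ≤ r - c then acc + 1 else acc) (0 : Int)
  if PySem.Int.mod (par + pyCell grid r c) 2 = 1 then ops ++ [(r, c)] else ops

def solve_alt (N : Int) (grid : List String) : Int :=
  (((PySem.List.pyRange 0 N).foldl
      (fun ops r => (PySem.List.pyRange 0 N).foldl (stepB grid r) ops) []).length : Int)

-- ===== PRECONDITION & SPEC =====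
-- Pre_solve = exactly the inputs where Python A returns normally: the first N rows exist,
-- are at least N long, and their first N characters are digits (otherwise grid[r][c] raises
-- IndexError or int(...) raises ValueError).
def Pre_solve (N : Int) (grid : List String) : Prop :=
  N.toNat ≤ grid.length ∧
    ∀ r ∈ List.range N.toNat, N.toNat ≤ (grid.getD r "").toList.length ∧
      ∀ c ∈ List.range N.toNat, ((grid.getD r "").toList.getD c ' ').isDigit
instance (N : Int) (grid : List String) : Decidable (Pre_solve N grid) := by
  unfold Pre_solve; infer_instance

def pvWitness_solve : Int × List String := (2, ["10", "01"])

def Spec_solve (N : Int) (grid : List String) (out : Int) : Prop := out = solve_alt N grid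
instance (N : Int) (grid : List String) (out : Int) : Decidable (Spec_solve N grid out) := by
  unfold Spec_solve; infer_instance

-- ===== CLAIM (what is proved, stated in full; the proofs are below) =====
def Claim_equal_solve : Prop :=
  ∀ (N : Int) (grid : List String), Dom_solve N grid → Pre_solve N grid →
    Spec_solve N grid (solve N grid)

-- ===== LEMMAS AND PROOFS =====

-- The common mathematical content: the greedy triggers the operation at (r, c) iff the cell's
-- value plus the number of earlier triggered operations covering it is odd, where an operation
-- at (i, j) covers (r, c) iff i + j <= r + c and i - j <= r - c (hence i < r unless (i,j) = (r,c)).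

def gfun (grid : List String) : Nat → Nat → Int := fun r c => pyCell grid r c

-- covering predicate on Nat coordinates (i - j ≤ r - c stated subtraction-free)
def covB (r c : Nat) (p : Nat × Nat) : Bool := decide (p.1 + p.2 ≤ r + c ∧ p.1 + c ≤ r + p.2)

def cnt (L : List (Nat × Nat)) (r c : Nat) : Nat := L.countP (covB r c)

-- the triggered operations of row r among columns < m, given the ops L of earlier rows
def rowUpto (g : Nat → Nat → Int) (L : List (Nat × Nat)) (r m : Nat) : List (Nat × Nat) :=
  (List.range m).filterMap
    (fun c => if ((cnt L r c : Int) + g r c) % 2 = 1 then some (r, c) else none)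

-- all triggered operations in rows < r, in row-major order
def trig (g : Nat → Nat → Int) (n : Nat) : Nat → List (Nat × Nat)
  | 0 => []
  | r+1 => trig g n r ++ rowUpto g (trig g n r) r n

-- A-side counting abstractions over the full set of triggered ops T = trig g n n
def cntLE (g : Nat → Nat → Int) (n : Nat) (d s : Int) : Nat :=
  (trig g n n).countP (fun p => decide ((p.1:Int) - p.2 ≤ d ∧ (p.1:Int) + p.2 ≤ s))

def cornerCnt (g : Nat → Nat → Int) (n : Nat) (d s : Int) : Nat :=
  (trig g n n).countP (fun p => decide ((p.1:Int) - p.2 = d ∧ (p.1:Int) + p.2 = s))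

def resD (g : Nat → Nat → Int) (n : Nat) (d : Int) : Nat :=
  (trig g n n).countP (fun p => decide ((p.1:Int) - p.2 ≤ d))

def resDS (g : Nat → Nat → Int) (n : Nat) (d s : Int) : Nat :=
  (trig g n n).countP (fun p => decide ((p.1:Int) - p.2 = d ∧ (p.1:Int) + p.2 ≤ s))

-- dp list shape of A's invariant
def dpSpec (g : Nat → Nat → Int) (n : Nat) (d : Int) (k : Nat) : List Int :=
  (List.range (2*n)).map (fun s' => if s' < k then (cntLE g n d s' : Int) else 0)

def opsInt (L : List (Nat × Nat)) : List (Int × Int) := L.map (fun p => ((p.1 : Int), (p.2 : Int)))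

-- generic pointwise countP identity
theorem countP_ident2 {α : Type} (l : List α) (P1 P2 Q1 Q2 Q3 : α → Bool)
    (h : ∀ a ∈ l, ((if P1 a then 1 else 0) + (if P2 a then 1 else 0) : Nat)
        = (if Q1 a then 1 else 0) + (if Q2 a then 1 else 0) + (if Q3 a then 1 else 0)) :
    l.countP P1 + l.countP P2 = l.countP Q1 + l.countP Q2 + l.countP Q3 := by
  induction l with
  | nil => simp
  | cons a t ih =>
    have ha := h a (by simp)
    have ht := ih (fun b hb => h b (by simp [hb]))
    simp only [List.countP_cons]
    by_cases h1 : P1 a <;> by_cases h2 : P2 a <;> by_cases h3 : Q1 a <;> by_cases h4 : Q2 a <;>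
      by_cases h5 : Q3 a <;> simp_all <;> omega

theorem countP_eq_ite_mem {α : Type} [DecidableEq α] (l : List α) (hl : l.Nodup) (x : α) :
    l.countP (fun a => decide (a = x)) = if x ∈ l then 1 else 0 := by
  induction l with
  | nil => simp
  | cons a t ih =>
    simp only [List.nodup_cons] at hl
    rcases hl with ⟨ha, ht⟩
    by_cases hx : a = x
    · subst hx
      have : t.countP (fun b => decide (b = a)) = 0 := by
        rw [List.countP_eq_zero]; intro b hb; simp; rintro rfl; exact ha hb
      simp [this]
    · simp [hx, ih ht, Ne.symm hx]

theorem mem_rowUpto (g : Nat → Nat → Int) (L : List (Nat × Nat)) (r m : Nat) (p : Nat × Nat) :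
    p ∈ rowUpto g L r m ↔ p.1 = r ∧ p.2 < m ∧ ((cnt L r p.2 : Int) + g r p.2) % 2 = 1 := by
  obtain ⟨p1, p2⟩ := p
  simp only [rowUpto, List.mem_filterMap, List.mem_range, Option.ite_none_right_eq_some,
    Option.some.injEq, Prod.mk.injEq]
  constructor
  · rintro ⟨c, hc, hcond, rfl, rfl⟩; exact ⟨rfl, hc, hcond⟩
  · rintro ⟨rfl, h2, h3⟩; exact ⟨p2, h2, h3, rfl, rfl⟩

theorem mem_trig_bounds (g : Nat → Nat → Int) (n r : Nat) (p : Nat × Nat)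
    (hp : p ∈ trig g n r) : p.1 < r ∧ p.2 < n := by
  induction r with
  | zero => simp [trig] at hp
  | succ r ih =>
    simp only [trig, List.mem_append] at hp
    rcases hp with hp | hp
    · exact ⟨Nat.lt_succ_of_lt (ih hp).1, (ih hp).2⟩
    · rw [mem_rowUpto] at hp
      omega

theorem trig_decomp (g : Nat → Nat → Int) (n : Nat) {r r' : Nat} (h : r ≤ r') :
    ∃ suf, trig g n r' = trig g n r ++ suf ∧ ∀ p ∈ suf, r ≤ p.1 := by
  induction r', h using Nat.le_induction with
  | base => exact ⟨[], by simp⟩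
  | succ r' hr ih =>
    obtain ⟨suf, hsuf, hmem⟩ := ih
    refine ⟨suf ++ rowUpto g (trig g n r') r' n, by simp [trig, hsuf], ?_⟩
    intro p hp
    rcases List.mem_append.1 hp with hp | hp
    · exact hmem p hp
    · rw [mem_rowUpto] at hp; omega

theorem trig_nodup (g : Nat → Nat → Int) (n r : Nat) : (trig g n r).Nodup := by
  induction r with
  | zero => simp [trig]
  | succ r ih =>
    refine List.Nodup.append ih ?_ ?_
    · refine List.Nodup.filterMap ?_ (List.nodup_range)
      intro a b c hac hbc
      split_ifs at hac hbc
      · simp only [Option.mem_def, Option.some.injEq] at hac hbc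
        rw [← hbc] at hac
        simpa using hac
      · exact absurd hbc (by simp)
      · exact absurd hac (by simp)
      · exact absurd hac (by simp)
    · intro p hp hp'
      have h1 := (mem_trig_bounds g n r p hp).1
      rw [mem_rowUpto] at hp'
      omega

theorem mem_trig_top (g : Nat → Nat → Int) (n r c : Nat) (hr : r < n) :
    (r, c) ∈ trig g n n ↔ (r, c) ∈ rowUpto g (trig g n r) r n := by
  obtain ⟨suf, hsuf, hmem⟩ := trig_decomp g n (show r + 1 ≤ n from hr)
  rw [hsuf]
  constructor
  · intro hp
    rcases List.mem_append.1 hp with hp | hp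
    · simp only [trig, List.mem_append] at hp
      rcases hp with hp | hp
      · exact absurd (mem_trig_bounds g n r _ hp).1 (by omega)
      · exact hp
    · exact absurd (hmem _ hp) (by omega)
  · intro hp
    exact List.mem_append.2 (Or.inl (by simp only [trig, List.mem_append]; exact Or.inr hp))

theorem cntLE_zero_s (g : Nat → Nat → Int) (n : Nat) (d s : Int) (hs : s < 0) :
    cntLE g n d s = 0 := by
  rw [cntLE, List.countP_eq_zero]
  intro p _
  simp only [decide_eq_true_eq]
  omega

theorem cntLE_zero_d (g : Nat → Nat → Int) (n : Nat) (d s : Int) (hd : d < 1 - (n:Int)) :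
    cntLE g n d s = 0 := by
  rw [cntLE, List.countP_eq_zero]
  intro p hp
  have hb := mem_trig_bounds g n n p hp
  simp only [decide_eq_true_eq]
  omega

theorem cnt_eq_T (g : Nat → Nat → Int) (n r c : Nat) (hr : r < n) :
    cntLE g n ((r:Int) - c) ((r:Int) + c)
      = cnt (trig g n r) r c + (if (r, c) ∈ trig g n n then 1 else 0) := by
  obtain ⟨suf, hsuf, hmem⟩ := trig_decomp g n (Nat.le_of_lt hr)
  have hnd : suf.Nodup := by
    have h := trig_nodup g n n
    rw [hsuf] at h
    exact h.of_append_right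
  have hnotr : (r, c) ∉ trig g n r := fun h => by
    have := (mem_trig_bounds g n r _ h).1; omega
  have h1 : (trig g n r).countP
        (fun p => decide ((p.1:Int) - p.2 ≤ (r:Int) - c ∧ (p.1:Int) + p.2 ≤ (r:Int) + c))
      = cnt (trig g n r) r c := by
    unfold cnt
    apply List.countP_congr
    intro p _
    simp only [covB, decide_eq_true_eq]
    omega
  have h2 : suf.countP
        (fun p => decide ((p.1:Int) - p.2 ≤ (r:Int) - c ∧ (p.1:Int) + p.2 ≤ (r:Int) + c))
      = (if (r, c) ∈ trig g n n then 1 else 0) := by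
    rw [show suf.countP (fun p => decide ((p.1:Int) - p.2 ≤ (r:Int) - c ∧ (p.1:Int) + p.2 ≤ (r:Int) + c))
        = suf.countP (fun p => decide (p = (r, c))) from
      List.countP_congr (by
        intro p hp
        have := hmem p hp
        simp only [decide_eq_true_eq, Prod.ext_iff]
        omega),
      countP_eq_ite_mem suf hnd]
    have hiff : ((r, c) ∈ trig g n n) ↔ ((r, c) ∈ suf) := by
      rw [hsuf, List.mem_append]
      exact ⟨fun h => h.resolve_left hnotr, Or.inr⟩
    by_cases hm : (r, c) ∈ suf <;> simp [hm, hiff]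
  rw [cntLE, hsuf, List.countP_append, h1, h2, ← hsuf]

theorem corner_val (g : Nat → Nat → Int) (n r c : Nat) :
    cornerCnt g n ((r:Int) - c) ((r:Int) + c) = (if (r, c) ∈ trig g n n then 1 else 0) := by
  rw [cornerCnt]
  rw [show (trig g n n).countP (fun p => decide ((p.1:Int) - p.2 = (r:Int) - c ∧ (p.1:Int) + p.2 = (r:Int) + c))
      = (trig g n n).countP (fun p => decide (p = (r, c))) from
    List.countP_congr (by
      intro p hp
      simp only [decide_eq_true_eq, Prod.ext_iff]
      constructor
      · intro h; omega
      · rintro ⟨h1, h2⟩; omega)]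
  by_cases hmem : (r, c) ∈ trig g n n <;>
    simp [hmem, countP_eq_ite_mem _ (trig_nodup g n n)]

theorem corner_zero (g : Nat → Nat → Int) (n : Nat) (d s : Int)
    (h : ∀ r c : Nat, r < n → c < n → ¬((r:Int) - c = d ∧ (r:Int) + c = s)) :
    cornerCnt g n d s = 0 := by
  rw [cornerCnt, List.countP_eq_zero]
  intro p hp
  have hb := mem_trig_bounds g n n p hp
  simp only [decide_eq_true_eq]
  exact h p.1 p.2 hb.1 hb.2

theorem quad_ident (g : Nat → Nat → Int) (n : Nat) (d s : Int) :
    cntLE g n d s + cntLE g n (d-1) (s-1)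
      = cntLE g n d (s-1) + cntLE g n (d-1) s + cornerCnt g n d s := by
  apply countP_ident2
  intro a _
  simp only [decide_eq_true_eq]
  split_ifs <;> omega

theorem resDS_succ (g : Nat → Nat → Int) (n : Nat) (d s : Int) :
    resDS g n d s = resDS g n d (s-1) + cornerCnt g n d s := by
  have := countP_ident2 (trig g n n)
    (fun p => decide ((p.1:Int) - p.2 = d ∧ (p.1:Int) + p.2 ≤ s)) (fun _ => false)
    (fun p => decide ((p.1:Int) - p.2 = d ∧ (p.1:Int) + p.2 ≤ s - 1))
    (fun p => decide ((p.1:Int) - p.2 = d ∧ (p.1:Int) + p.2 = s)) (fun _ => false)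
    (by intro a _; simp only [decide_eq_true_eq]; split_ifs <;> omega)
  simpa [resDS, cornerCnt] using this

theorem resD_step (g : Nat → Nat → Int) (n : Nat) (_hn : 0 < n) (d : Int) :
    resD g n (d-1) + resDS g n d (2*(n:Int) - 2) = resD g n d := by
  have := countP_ident2 (trig g n n)
    (fun p => decide ((p.1:Int) - p.2 ≤ d - 1))
    (fun p => decide ((p.1:Int) - p.2 = d ∧ (p.1:Int) + p.2 ≤ 2*(n:Int) - 2))
    (fun p => decide ((p.1:Int) - p.2 ≤ d)) (fun _ => false) (fun _ => false)
    (by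
      intro a ha
      have hb := mem_trig_bounds g n n a ha
      by_cases h1 : (a.1:Int) - a.2 ≤ d - 1 <;>
        by_cases h2 : (a.1:Int) - a.2 = d <;>
          by_cases h3 : (a.1:Int) + a.2 ≤ 2*(n:Int) - 2 <;>
            by_cases h4 : (a.1:Int) - a.2 ≤ d <;>
              simp [h1, h2, h3, h4] <;> omega)
  simpa [resD, resDS] using this

theorem dpSpec_zero (g : Nat → Nat → Int) (n : Nat) (d : Int) :
    dpSpec g n d 0 = List.replicate (2*n) (0:Int) := by
  simp [dpSpec, List.map_const']

theorem dpSpec_neg_d (g : Nat → Nat → Int) (n : Nat) (d : Int) (hd : d < 1 - (n:Int)) (k : Nat) :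
    dpSpec g n d k = List.replicate (2*n) (0:Int) := by
  rw [dpSpec, show (fun s' => if s' < k then (cntLE g n d s' : Int) else 0) = fun _ : Nat => (0:Int) by
    funext s'; rw [cntLE_zero_d g n d s' hd]; simp, List.map_const']
  simp

theorem dpSpec_pyGetD (g : Nat → Nat → Int) (n : Nat) (hn : 0 < n) (d : Int) (m : Nat)
    (hm : m ≤ 2*n - 1) (i : Int) (h1 : -1 ≤ i) (h2 : i ≤ 2*(n:Int) - 1) :
    PySem.List.pyGetD (dpSpec g n d m) i 0 = if i < (m:Int) then (cntLE g n d i : Int) else 0 := by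
  have hlen : (dpSpec g n d m).length = 2*n := by simp [dpSpec]
  rcases (show i = -1 ∨ 0 ≤ i by omega) with rfl | hi
  · have hne : dpSpec g n d m ≠ [] := by
      intro h; rw [h] at hlen; simp at hlen; omega
    rw [PySem.List.pyGetD_neg_one _ _ hne, List.getLast_eq_getElem]
    simp only [dpSpec, List.length_map, List.length_range, List.getElem_map, List.getElem_range]
    rw [if_neg (by omega), if_pos (by omega), cntLE_zero_s g n d (-1) (by norm_num)]
    simp
  · obtain ⟨j, rfl⟩ : ∃ j : Nat, i = (j:Int) := ⟨i.toNat, by omega⟩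
    rw [PySem.List.pyGetD_natCast, dpSpec, PySem.List.getD_map_range _ _ _ _ (by omega)]
    by_cases hjm : j < m
    · rw [if_pos hjm, if_pos (by exact_mod_cast hjm)]
    · rw [if_neg hjm, if_neg (by exact_mod_cast hjm)]

theorem dpSpec_set (g : Nat → Nat → Int) (n : Nat) (d : Int) (k : Nat) (h : k < 2*n) :
    (dpSpec g n d k).set k ((cntLE g n d k : Int)) = dpSpec g n d (k+1) := by
  apply List.ext_getElem
  · simp [dpSpec]
  · intro i hi1 hi2
    simp only [dpSpec, List.length_map, List.length_range] at hi2
    simp only [dpSpec, List.getElem_set, List.getElem_map, List.getElem_range]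
    by_cases hik : i = k
    · subst hik; simp
    · simp
      split_ifs <;> first | rfl | omega

theorem stepA_eval (grid : List String) (n : Nat) (hn : 0 < n) (d : Int)
    (hd1 : 1 - (n:Int) ≤ d) (hd2 : d ≤ (n:Int) - 1) (k : Nat) (hklt : k < 2*n - 1) (R : Int) :
    stepA grid (n:Int) d (dpSpec (gfun grid) n (d-1) (2*n-1)) (dpSpec (gfun grid) n d k, R) (k:Int)
      = (dpSpec (gfun grid) n d (k+1), R + (cornerCnt (gfun grid) n d (k:Int) : Int)) := by
  have hv2 : PySem.List.pyGetD (dpSpec (gfun grid) n d k) ((k:Int)-1) 0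
      = (cntLE (gfun grid) n d ((k:Int)-1) : Int) := by
    rw [dpSpec_pyGetD (gfun grid) n hn d k (by omega) _ (by omega) (by omega), if_pos (by omega)]
  have hv1a : PySem.List.pyGetD (dpSpec (gfun grid) n (d-1) (2*n-1)) ((k:Int)) 0
      = (cntLE (gfun grid) n (d-1) ((k:Int)) : Int) := by
    rw [dpSpec_pyGetD (gfun grid) n hn (d-1) (2*n-1) (by omega) _ (by omega) (by omega),
      if_pos (by omega)]
  have hv1b : PySem.List.pyGetD (dpSpec (gfun grid) n (d-1) (2*n-1)) ((k:Int)-1) 0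
      = (cntLE (gfun grid) n (d-1) ((k:Int)-1) : Int) := by
    rw [dpSpec_pyGetD (gfun grid) n hn (d-1) (2*n-1) (by omega) _ (by omega) (by omega),
      if_pos (by omega)]
  have hquad := quad_ident (gfun grid) n d (k:Int)
  simp only [stepA, hv2, hv1a, hv1b]
  set v : Int := (cntLE (gfun grid) n d ((k:Int)-1) : Int)
      + (cntLE (gfun grid) n (d-1) ((k:Int)) : Int) - (cntLE (gfun grid) n (d-1) ((k:Int)-1) : Int)
    with hvdef
  have hvval : v = (cntLE (gfun grid) n d (k:Int) : Int) - (cornerCnt (gfun grid) n d (k:Int) : Int) := by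
    rw [hvdef]; omega
  rw [PySem.Int.band_one]
  by_cases hpar : PySem.Int.mod ((k:Int) + d) 2 = 0
  · -- (s + d) even: the parity test does not fire
    have hdvd : (2:Int) ∣ (k:Int) + d := (PySem.Int.mod_eq_zero_iff_dvd _ _).1 hpar
    have hrr : PySem.Int.floordiv ((k:Int) + d) 2 = ((k:Int) + d) / 2 :=
      PySem.Int.floordiv_eq_ediv_of_pos (by norm_num)
    have hcc : PySem.Int.floordiv ((k:Int) - d) 2 = ((k:Int) - d) / 2 :=
      PySem.Int.floordiv_eq_ediv_of_pos (by norm_num)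
    rw [hrr, hcc]
    by_cases hrange : 0 ≤ ((k:Int) - d) / 2 ∧ ((k:Int) - d) / 2 < (n:Int)
        ∧ 0 ≤ ((k:Int) + d) / 2 ∧ ((k:Int) + d) / 2 < (n:Int)
    · -- live cell (r, c)
      obtain ⟨rn, cn, hrn, hcn, hrnn, hcnn, hd0, hs0⟩ :
          ∃ rn cn : Nat, ((rn:Int) = ((k:Int) + d) / 2) ∧ ((cn:Int) = ((k:Int) - d) / 2)
            ∧ rn < n ∧ cn < n ∧ (rn:Int) - cn = d ∧ (rn:Int) + cn = (k:Int) :=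
        ⟨(((k:Int) + d) / 2).toNat, (((k:Int) - d) / 2).toNat,
          by omega, by omega, by omega, by omega, by omega, by omega⟩
      rw [← hrn, ← hcn]
      rw [if_neg (by simp only [ne_eq, not_or, not_not]; exact ⟨hpar, by omega⟩)]
      have hcorner : cornerCnt (gfun grid) n d (k:Int)
          = (if (rn, cn) ∈ trig (gfun grid) n n then 1 else 0) := by
        have h := corner_val (gfun grid) n rn cn
        rw [hd0, hs0] at h
        exact h
      have hcntT : cntLE (gfun grid) n d (k:Int)
          = cnt (trig (gfun grid) n rn) rn cn
            + (if (rn, cn) ∈ trig (gfun grid) n n then 1 else 0) := by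
        have h := cnt_eq_T (gfun grid) n rn cn hrnn
        rw [hd0, hs0] at h
        exact h
      have hvcnt : v = (cnt (trig (gfun grid) n rn) rn cn : Int) := by
        rw [hvval, hcntT, hcorner]
        by_cases hmem : (rn, cn) ∈ trig (gfun grid) n n <;> simp [hmem]
      have hcond : (PySem.Int.band (v + pyCell grid (rn:Int) (cn:Int)) 1 ≠ 0)
          ↔ (rn, cn) ∈ trig (gfun grid) n n := by
        rw [PySem.Int.band_one, hvcnt, mem_trig_top _ _ _ cn hrnn, mem_rowUpto,
          PySem.Int.mod_eq_emod_of_pos (by norm_num)]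
        have h2 := Int.emod_two_eq ((cnt (trig (gfun grid) n rn) rn cn : Int) + gfun grid rn cn)
        constructor
        · intro h
          refine ⟨rfl, hcnn, ?_⟩
          show ((cnt (trig (gfun grid) n rn) rn cn : Int) + pyCell grid (rn:Int) (cn:Int)) % 2 = 1
          omega
        · rintro ⟨-, -, h⟩
          have h' : ((cnt (trig (gfun grid) n rn) rn cn : Int) + pyCell grid (rn:Int) (cn:Int)) % 2 = 1 := h
          omega
      by_cases hmem : (rn, cn) ∈ trig (gfun grid) n n
      · rw [if_pos (hcond.2 hmem), PySem.List.pySetD_natCast, PySem.List.pySetD_natCast,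
          List.set_set]
        have hv1 : v + 1 = (cntLE (gfun grid) n d ((k:Nat):Int) : Int) := by
          rw [hvcnt, hcntT]; simp [hmem]
        rw [hv1, dpSpec_set _ _ _ _ (by omega), hcorner]
        simp [hmem]
      · rw [if_neg (fun hc => hmem (hcond.1 hc)), PySem.List.pySetD_natCast]
        have hv1 : v = (cntLE (gfun grid) n d ((k:Nat):Int) : Int) := by
          rw [hvcnt, hcntT]; simp [hmem]
        rw [hv1, dpSpec_set _ _ _ _ (by omega), hcorner]
        simp [hmem]
    · -- out of range: continue, and no triggered op sits on this (d, s)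
      have hcz : cornerCnt (gfun grid) n d (k:Int) = 0 := by
        apply corner_zero
        rintro r c hr hc ⟨h1, h2⟩
        exact hrange (by omega)
      rw [if_pos (Or.inr hrange)]
      rw [PySem.List.pySetD_natCast, hvval, hcz]
      rw [show (cntLE (gfun grid) n d (k:Int) : Int) - ((0:Nat):Int) = (cntLE (gfun grid) n d ((k:Nat):Int) : Int) by push_cast; ring]
      rw [dpSpec_set _ _ _ _ (by omega)]
      simp
  · -- (s + d) odd: continue, corner empty by parity
    have hcz : cornerCnt (gfun grid) n d (k:Int) = 0 := by
      apply corner_zero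
      rintro r c hr hc ⟨h1, h2⟩
      exact hpar ((PySem.Int.mod_eq_zero_iff_dvd _ _).2 ⟨(r:Int), by omega⟩)
    rw [if_pos (Or.inl hpar)]
    rw [PySem.List.pySetD_natCast, hvval, hcz]
    rw [show (cntLE (gfun grid) n d (k:Int) : Int) - ((0:Nat):Int) = (cntLE (gfun grid) n d ((k:Nat):Int) : Int) by push_cast; ring]
    rw [dpSpec_set _ _ _ _ (by omega)]
    simp

theorem A_inner (grid : List String) (n : Nat) (hn : 0 < n) (d : Int)
    (hd1 : 1 - (n:Int) ≤ d) (hd2 : d ≤ (n:Int) - 1) (res0 : Int) (k : Nat) (hk : k ≤ 2*n - 1) :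
    (PySem.List.pyRange 0 (k:Int)).foldl
        (stepA grid (n:Int) d (dpSpec (gfun grid) n (d-1) (2*n-1)))
        (List.replicate (2*n) 0, res0)
      = (dpSpec (gfun grid) n d k, res0 + (resDS (gfun grid) n d ((k:Int) - 1) : Int)) := by
  induction k with
  | zero =>
    rw [show (((0:Nat)):Int) = 0 from rfl, PySem.List.pyRange_one_eq_nil (by omega)]
    simp only [List.foldl_nil]
    have h2 : resDS (gfun grid) n d ((0:Int) - 1) = 0 := by
      rw [resDS, List.countP_eq_zero]
      intro p _
      simp only [decide_eq_true_eq]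
      omega
    rw [dpSpec_zero, h2]
    simp
  | succ k ih =>
    have hk' : k ≤ 2*n - 1 := by omega
    rw [show (((k+1:Nat)):Int) = (k:Int) + 1 by push_cast; ring,
      PySem.List.pyRange_one_succ_right (by omega), List.foldl_append, ih hk']
    simp only [List.foldl_cons, List.foldl_nil]
    rw [stepA_eval grid n hn d hd1 hd2 k (by omega) _]
    rw [show (k:Int) + 1 - 1 = ((k:Nat):Int) by ring, resDS_succ (gfun grid) n d (k:Int)]
    simp only [Prod.mk.injEq]
    exact ⟨trivial, by push_cast; ring⟩

theorem A_outer (grid : List String) (n : Nat) (hn : 0 < n) (t : Nat) (ht : t ≤ 2*n - 1) :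
    (PySem.List.pyRange (1 - (n:Int)) (1 - (n:Int) + t)).foldl (stepAOuter grid (n:Int))
        (List.replicate (2*n) 0, 0)
      = (dpSpec (gfun grid) n (-(n:Int) + t) (2*n-1), (resD (gfun grid) n (-(n:Int) + t) : Int)) := by
  induction t with
  | zero =>
    rw [show (1 - (n:Int) + ((0:Nat):Int)) = 1 - (n:Int) by simp,
      PySem.List.pyRange_one_eq_nil (by omega)]
    simp only [List.foldl_nil]
    have h1 : dpSpec (gfun grid) n (-(n:Int) + ((0:Nat):Int)) (2*n-1) = List.replicate (2*n) 0 :=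
      dpSpec_neg_d _ _ _ (by omega) _
    have h2 : resD (gfun grid) n (-(n:Int) + ((0:Nat):Int)) = 0 := by
      rw [resD, List.countP_eq_zero]
      intro p hp
      have hb := mem_trig_bounds (gfun grid) n n p hp
      simp only [decide_eq_true_eq]
      omega
    rw [h1, h2]
    simp
  | succ t ih =>
    have ht' : t ≤ 2*n - 1 := by omega
    rw [show (1 - (n:Int) + ((t+1:Nat):Int)) = (1 - (n:Int) + (t:Int)) + 1 by push_cast; ring,
      PySem.List.pyRange_one_succ_right (by omega), List.foldl_append, ih ht']
    simp only [List.foldl_cons, List.foldl_nil, stepAOuter]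
    rw [show ((2*(n:Int)).toNat) = 2*n by omega,
      show (2*(n:Int) - 1) = ((2*n-1 : Nat):Int) by omega,
      show -(n:Int) + (t:Int) = (1 - (n:Int) + (t:Int)) - 1 by ring]
    rw [A_inner grid n hn (1 - (n:Int) + (t:Int)) (by omega) (by omega) _ (2*n-1) (le_refl _)]
    rw [show ((2*n-1 : Nat):Int) - 1 = 2*(n:Int) - 2 by omega,
      show -(n:Int) + ((t+1:Nat):Int) = 1 - (n:Int) + (t:Int) by push_cast; ring]
    have hres := resD_step (gfun grid) n hn (1 - (n:Int) + (t:Int))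
    simp only [Prod.mk.injEq]
    exact ⟨trivial, by omega⟩

theorem A_final (grid : List String) (n : Nat) (hn : 0 < n) :
    solve (n:Int) grid = ((trig (gfun grid) n n).length : Int) := by
  unfold solve
  rw [show ((2*(n:Int)).toNat) = 2*n by omega]
  have hb : PySem.List.pyRange (1 - (n:Int)) (n:Int)
      = PySem.List.pyRange (1 - (n:Int)) (1 - (n:Int) + ((2*n-1 : Nat):Int)) := by
    congr 1
    omega
  rw [hb, A_outer grid n hn (2*n-1) (le_refl _)]
  have h : resD (gfun grid) n (-(n:Int) + ((2*n-1 : Nat):Int)) = (trig (gfun grid) n n).length := by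
    rw [resD, List.countP_eq_length]
    intro p hp
    have hb := mem_trig_bounds (gfun grid) n n p hp
    simp only [decide_eq_true_eq]
    omega
  rw [h]

theorem B_inner (grid : List String) (n : Nat) (_hn : 0 < n) (r : Nat) (_hr : r < n)
    (k : Nat) (hk : k ≤ n) :
    (PySem.List.pyRange 0 (k:Int)).foldl (stepB grid (r:Int)) (opsInt (trig (gfun grid) n r))
      = opsInt (trig (gfun grid) n r ++ rowUpto (gfun grid) (trig (gfun grid) n r) r k) := by
  induction k with
  | zero =>
    rw [show (((0:Nat)):Int) = 0 from rfl, PySem.List.pyRange_one_eq_nil (by omega)]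
    simp [rowUpto]
  | succ k ih =>
    have hk' : k ≤ n := by omega
    rw [show (((k+1:Nat)):Int) = (k:Int) + 1 by push_cast; ring,
      PySem.List.pyRange_one_succ_right (by omega), List.foldl_append, ih hk']
    simp only [List.foldl_cons, List.foldl_nil, stepB]
    have hfun : (fun (acc : Int) (p : Int × Int) =>
          if p.1 + p.2 ≤ (r:Int) + (k:Int) ∧ p.1 - p.2 ≤ (r:Int) - (k:Int) then acc + 1 else acc)
        = (fun acc x =>
          if (fun q : Int × Int =>
              decide (q.1 + q.2 ≤ (r:Int) + (k:Int) ∧ q.1 - q.2 ≤ (r:Int) - (k:Int))) x = true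
            then acc + 1 else acc) := by
      funext acc p
      simp
    rw [hfun, PySem.List.foldl_count_if _ _ 0]
    have hcnt : (opsInt (trig (gfun grid) n r ++ rowUpto (gfun grid) (trig (gfun grid) n r) r k)).countP
          (fun q : Int × Int =>
            decide (q.1 + q.2 ≤ (r:Int) + (k:Int) ∧ q.1 - q.2 ≤ (r:Int) - (k:Int)))
        = cnt (trig (gfun grid) n r) r k := by
      rw [opsInt, List.map_append, List.countP_append, List.countP_map, List.countP_map]
      have hz : (rowUpto (gfun grid) (trig (gfun grid) n r) r k).countP
          ((fun q : Int × Int =>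
            decide (q.1 + q.2 ≤ (r:Int) + (k:Int) ∧ q.1 - q.2 ≤ (r:Int) - (k:Int)))
            ∘ (fun p : Nat × Nat => ((p.1 : Int), (p.2 : Int)))) = 0 := by
        rw [List.countP_eq_zero]
        intro p hp
        rw [mem_rowUpto] at hp
        simp only [Function.comp_apply, decide_eq_true_eq]
        omega
      have hc : (trig (gfun grid) n r).countP
          ((fun q : Int × Int =>
            decide (q.1 + q.2 ≤ (r:Int) + (k:Int) ∧ q.1 - q.2 ≤ (r:Int) - (k:Int)))
            ∘ (fun p : Nat × Nat => ((p.1 : Int), (p.2 : Int)))) = cnt (trig (gfun grid) n r) r k := by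
        unfold cnt
        apply List.countP_congr
        intro p _
        simp only [Function.comp_apply, covB, decide_eq_true_eq]
        omega
      rw [hz, hc]
      omega
    rw [hcnt]
    by_cases hcond : ((cnt (trig (gfun grid) n r) r k : Int) + gfun grid r k) % 2 = 1
    · have hrow : rowUpto (gfun grid) (trig (gfun grid) n r) r (k+1)
          = rowUpto (gfun grid) (trig (gfun grid) n r) r k ++ [(r, k)] := by
        rw [rowUpto, rowUpto, List.range_succ, List.filterMap_append]
        simp [hcond]
      rw [if_pos (by
        rw [PySem.Int.mod_eq_emod_of_pos (by norm_num)]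
        show ((0:Int) + ((cnt (trig (gfun grid) n r) r k : Int)) + pyCell grid (r:Int) (k:Int)) % 2 = 1
        have : ((cnt (trig (gfun grid) n r) r k : Int) + pyCell grid (r:Int) (k:Int)) % 2 = 1 := hcond
        omega)]
      rw [hrow]
      simp [opsInt]
    · have hrow : rowUpto (gfun grid) (trig (gfun grid) n r) r (k+1)
          = rowUpto (gfun grid) (trig (gfun grid) n r) r k := by
        rw [rowUpto, rowUpto, List.range_succ, List.filterMap_append]
        simp [hcond]
      rw [if_neg (by
        rw [PySem.Int.mod_eq_emod_of_pos (by norm_num)]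
        intro hc
        apply hcond
        have hc' : ((0:Int) + ((cnt (trig (gfun grid) n r) r k : Int)) + pyCell grid (r:Int) (k:Int)) % 2 = 1 := hc
        show ((cnt (trig (gfun grid) n r) r k : Int) + pyCell grid (r:Int) (k:Int)) % 2 = 1
        omega)]
      rw [hrow]

theorem B_outer (grid : List String) (n : Nat) (hn : 0 < n) (t : Nat) (ht : t ≤ n) :
    (PySem.List.pyRange 0 (t:Int)).foldl
        (fun ops r => (PySem.List.pyRange 0 (n:Int)).foldl (stepB grid r) ops) []
      = opsInt (trig (gfun grid) n t) := by
  induction t with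
  | zero =>
    rw [show (((0:Nat)):Int) = 0 from rfl,
      show PySem.List.pyRange (0:Int) (0:Int) = [] from PySem.List.pyRange_one_eq_nil (by omega)]
    simp [trig, opsInt]
  | succ t ih =>
    have ht' : t ≤ n := by omega
    rw [show (((t+1:Nat)):Int) = (t:Int) + 1 by push_cast; ring,
      PySem.List.pyRange_one_succ_right (by omega), List.foldl_append, ih ht']
    simp only [List.foldl_cons, List.foldl_nil]
    rw [B_inner grid n hn t (by omega) n (le_refl _)]
    rfl

theorem B_final (grid : List String) (n : Nat) (hn : 0 < n) :
    solve_alt (n:Int) grid = ((trig (gfun grid) n n).length : Int) := by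
  unfold solve_alt
  rw [B_outer grid n hn n (le_refl _), opsInt, List.length_map]

-- ===== VERDICT (by name: the statement is the Claim_ definition above) =====
theorem solve_spec : Claim_equal_solve := by
  unfold Claim_equal_solve
  intro N grid _dom _pre
  unfold Spec_solve
  by_cases hN : 0 < N
  · have hNn : N = (N.toNat : Int) := by omega
    rw [hNn, A_final grid N.toNat (by omega), B_final grid N.toNat (by omega)]
  · have h1 : solve N grid = 0 := by
      unfold solve
      rw [PySem.List.pyRange_one_eq_nil (by omega)]
      rfl
    have h2 : solve_alt N grid = 0 := by
      unfold solve_alt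
      rw [PySem.List.pyRange_one_eq_nil (by omega)]
      rfl
    rw [h1, h2]
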